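-- pv_equiv track=rewrite | github.com/nguyensiviet1999/knn-phien-ban-cuoi | feature.py | getNumOfWords
-- ===== SOURCE A (Python) =====
-- def getNumOfWords(X_data_):
--     numOfWords=[]
--     for bagOfWords in X_data_:
--         numOfWordsTemp = dict.fromkeys(set(bagOfWords.split(' ')).union(), 0)
--         for word in bagOfWords.split(' '):
--             numOfWordsTemp[word] += 1
--         numOfWords.append(numOfWordsTemp)
--     return numOfWords
-- ===== SOURCE B (Python) =====
-- def getNumOfWords(X_data_):
--     numOfWords = []
--     for bagOfWords in X_data_:
--         words = bagOfWords.split(' ')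
--         numOfWords.append({w: words.count(w) for w in set(words)})
--     return numOfWords
-- ===== Notes on version B (the rewrite author's own statement) =====
-- stated objective: simpler
-- what changed: Replaces A's fromkeys-seeded dict plus an increment pass with a single dict comprehension pairing each distinct word with words.count(w).
import Mathlib
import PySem

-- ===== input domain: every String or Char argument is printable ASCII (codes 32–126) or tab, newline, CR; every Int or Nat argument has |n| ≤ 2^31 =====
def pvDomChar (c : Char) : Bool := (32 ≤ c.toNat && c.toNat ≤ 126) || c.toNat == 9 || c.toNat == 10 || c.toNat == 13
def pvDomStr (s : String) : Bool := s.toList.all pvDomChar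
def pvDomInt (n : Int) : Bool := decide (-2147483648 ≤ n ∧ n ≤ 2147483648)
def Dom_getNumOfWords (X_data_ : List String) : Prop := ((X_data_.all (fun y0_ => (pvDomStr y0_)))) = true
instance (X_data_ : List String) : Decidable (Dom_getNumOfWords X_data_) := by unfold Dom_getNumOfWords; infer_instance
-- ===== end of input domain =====

-- B builds each frequency dict with one comprehension over the distinct words (words.count), instead of A's fromkeys-then-increment pass; same values, not faster.
-- Dict iteration of the returned dicts is in set(words) first-occurrence order here; Python dict equality ignores order.

-- ===== PORT A =====
-- numOfWordsTemp[word] += 1 is ported as modify with default 0: the key is always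
-- present because fromkeys seeded every word of the split, so no KeyError can occur.
def getNumOfWords (X_data_ : List String) : List (List (String × Int)) :=
  X_data_.foldl
    (fun numOfWords bagOfWords =>
      -- .split(' '): sep ≠ "" so split? is always some; .getD [] only discharges the option
      let ws := (PySem.Str.split? bagOfWords " ").getD []
      -- dict.fromkeys(set(...).union(), 0): .union() with no args is the set itself
      let d0 := (PySem.Set.ofList ws).foldl (fun d k => d.insert k (0 : Int)) PySem.Dict.empty
      let d := ws.foldl (fun d w => d.modify w 0 (· + 1)) d0
      numOfWords ++ [d.items]) []

-- ===== PORT B =====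
def getNumOfWords_alt (X_data_ : List String) : List (List (String × Int)) :=
  X_data_.map (fun bagOfWords =>
    let words := (PySem.Str.split? bagOfWords " ").getD []
    (PySem.Set.ofList words).map (fun w => (w, (words.count w : Int))))

-- ===== PRECONDITION & SPEC =====
def Spec_getNumOfWords (X_data_ : List String) (out : List (List (String × Int))) : Prop := out = getNumOfWords_alt X_data_
instance (X_data_ : List String) (out : List (List (String × Int))) : Decidable (Spec_getNumOfWords X_data_ out) := by unfold Spec_getNumOfWords; infer_instance

-- ===== CLAIM (what is proved, stated in full; the proofs are below) =====
def Claim_equal_getNumOfWords : Prop := ∀ (X_data_ : List String), Dom_getNumOfWords X_data_ → Spec_getNumOfWords X_data_ (getNumOfWords X_data_)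

-- ===== LEMMAS AND PROOFS =====

-- inserting value 0 never changes a lookup with default 0
lemma getD_foldl_insert_zero (l : List String) (d : PySem.Dict String Int) (v : String)
    (h : d.getD v 0 = 0) :
    (l.foldl (fun d k => d.insert k (0 : Int)) d).getD v 0 = 0 := by
  induction l generalizing d with
  | nil => simpa using h
  | cons k t ih =>
    simp only [List.foldl_cons]
    apply ih
    by_cases hk : v = k
    · subst hk; simp
    · simpa [PySem.Dict.getD_insert, hk] using h

-- updating a set with elements it already contains is the identity
lemma set_update_of_subset (l : List String) (s : PySem.Set String)
    (h : ∀ x ∈ l, x ∈ s) : PySem.Set.update s l = s := by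
  induction l generalizing s with
  | nil => rfl
  | cons x t ih =>
    have hx : x ∈ s := h x (by simp)
    have : PySem.Set.add s x = s := by
      simp [PySem.Set.add, PySem.Set.contains, hx]
    simp only [PySem.Set.update, List.foldl_cons]
    rw [show List.foldl PySem.Set.add (PySem.Set.add s x) t = PySem.Set.update (PySem.Set.add s x) t from rfl,
        this]
    exact ih s (fun y hy => h y (by simp [hy]))

-- the per-document dict A builds has exactly B's items
lemma perDoc_items (ws : List String) :
    ((ws.foldl (fun d w => d.modify w 0 (· + 1))
        ((PySem.Set.ofList ws).foldl (fun d k => d.insert k (0 : Int)) PySem.Dict.empty)).items)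
      = (PySem.Set.ofList ws).map (fun w => (w, (ws.count w : Int))) := by
  set keys := PySem.Set.ofList ws with hkeys
  set d0 := keys.foldl (fun d k => d.insert k (0 : Int)) PySem.Dict.empty with hd0
  set dA := ws.foldl (fun d w => d.modify w 0 (· + 1)) d0 with hdA
  have hk0 : d0.keys = keys := by
    rw [hd0, PySem.Dict.keys_foldl_insert]
    simp [hkeys, PySem.Set.update_nil_left, PySem.Set.ofList_ofList]
  have hkA : dA.keys = keys := by
    rw [hdA, PySem.Dict.keys_foldl_modify, hk0]
    exact set_update_of_subset ws keys (fun x hx => by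
      simpa [hkeys] using (PySem.Set.mem_ofList ws x).2 hx)
  have hnd : dA.keys.Nodup := by rw [hkA, hkeys]; exact PySem.Set.nodup_ofList ws
  have hval : ∀ v, dA.getD v 0 = (ws.count v : Int) := by
    intro v
    rw [hdA, PySem.Dict.getD_foldl_modify_add_one, hd0,
        getD_foldl_insert_zero _ _ _ (by simp)]
    ring
  rw [PySem.Dict.items_eq_map_keys dA hnd 0, hkA]
  exact List.map_congr_left (fun w _ => by rw [hval w])

-- ===== VERDICT (by name: the statement is the Claim_ definition above) =====
theorem getNumOfWords_spec : Claim_equal_getNumOfWords := by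
  intro X _
  show _ = _
  unfold getNumOfWords getNumOfWords_alt
  rw [PySem.List.foldl_append_singleton_eq_map]
  exact List.map_congr_left (fun bag _ => perDoc_items _)
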